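-- pv_equiv track=rewrite | github.com/alexberga757/Engrapfo---Unstable-Text-Data | stringParse.py | RemoveFirstSpace
-- ===== SOURCE A (Python) =====
-- def RemoveFirstSpace(value):
-- 	token = "";
-- 	allow = False;
--
-- 	for chrs in value:
-- 		if (chrs == " " or chrs == "\n" or chrs == "\t"):
-- 			if (allow):
-- 				token += chrs;
-- 			else:
-- 				pass;
-- 		else:
-- 			token += chrs;
-- 			allow = True;
--
-- 	return token;
-- ===== SOURCE B (Python) =====
-- def RemoveFirstSpace(value):
--     return value.lstrip(" \n\t")
-- ===== Notes on version B (the rewrite author's own statement) =====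
-- stated objective: faster
-- what changed: Replaces the char-by-char accumulation behind an 'allow' flag with a single lstrip call on the whitespace set, dropping the leading prefix at once.
import Mathlib
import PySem

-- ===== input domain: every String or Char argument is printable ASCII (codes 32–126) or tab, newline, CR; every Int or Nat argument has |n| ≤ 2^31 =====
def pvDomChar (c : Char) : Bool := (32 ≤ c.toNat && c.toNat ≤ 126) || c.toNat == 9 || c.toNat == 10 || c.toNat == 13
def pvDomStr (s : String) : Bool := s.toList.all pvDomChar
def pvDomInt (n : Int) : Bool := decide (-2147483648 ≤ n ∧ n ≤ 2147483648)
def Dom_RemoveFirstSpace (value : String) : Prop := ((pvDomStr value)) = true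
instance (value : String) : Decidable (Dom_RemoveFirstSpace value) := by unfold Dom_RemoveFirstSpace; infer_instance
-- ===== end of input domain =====

-- B replaces A's char-by-char accumulation behind an 'allow' flag with a single lstrip(" \n\t") (idiomatic; return value only).


-- ===== PORT A =====
-- loop body: token/allow state, branches in A's order
def pvStepA (st : List Char × Bool) (c : Char) : List Char × Bool :=
  if c = ' ' ∨ c = '\n' ∨ c = '\t' then
    (if st.2 then (st.1 ++ [c], st.2) else st)
  else (st.1 ++ [c], true)

def RemoveFirstSpace (value : String) : String :=
  String.mk (value.toList.foldl pvStepA ([], false)).1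

-- ===== PORT B =====
-- Python's str.lstrip(" \n\t") is not a PySem primitive; ported by hand as dropWhile of
-- membership in the char set, which is exact for str.lstrip(chars).
def RemoveFirstSpace_alt (value : String) : String :=
  String.mk (value.toList.dropWhile (fun c => c ∈ [' ', '\n', '\t']))

-- ===== PRECONDITION & SPEC =====
def Spec_RemoveFirstSpace (value : String) (out : String) : Prop := out = RemoveFirstSpace_alt value
instance (value : String) (out : String) : Decidable (Spec_RemoveFirstSpace value out) := by unfold Spec_RemoveFirstSpace; infer_instance

-- ===== CLAIM (what is proved, stated in full; the proofs are below) =====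
def Claim_equal_RemoveFirstSpace : Prop := ∀ (value : String), Dom_RemoveFirstSpace value → Spec_RemoveFirstSpace value (RemoveFirstSpace value)

-- ===== LEMMAS AND PROOFS =====
-- Once allow is true, A appends every remaining character.
theorem pvFoldA_true (l t : List Char) : l.foldl pvStepA (t, true) = (t ++ l, true) := by
  induction l generalizing t with
  | nil => simp
  | cons c l ih =>
      by_cases h : c = ' ' ∨ c = '\n' ∨ c = '\t' <;>
        simp [pvStepA, h, ih]

-- With allow still false and an empty token, A computes the dropWhile of the whitespace set.
theorem pvFoldA_false (l : List Char) :
    (l.foldl pvStepA ([], false)).1 = l.dropWhile (fun c => c ∈ [' ', '\n', '\t']) := by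
  induction l with
  | nil => simp
  | cons c l ih =>
      by_cases h : c = ' ' ∨ c = '\n' ∨ c = '\t'
      · simpa [pvStepA, h, List.dropWhile_cons, h] using ih
      · simp [pvStepA, h, pvFoldA_true]

-- ===== VERDICT (by name: the statement is the Claim_ definition above) =====
theorem RemoveFirstSpace_spec : Claim_equal_RemoveFirstSpace := by
  intro value _
  unfold Spec_RemoveFirstSpace RemoveFirstSpace RemoveFirstSpace_alt
  rw [pvFoldA_false]
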